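-- pv_equiv track=rewrite | github.com/Kitcat-Alt/My_Code | Math/Méthodes num/TP2/exo2.py | A
-- ===== SOURCE A (Python) =====
-- def A(n):
--     res = 0
--     cpt = 0
--     for k in range(n):
--         if (n%2==0):
--             for i in range(n):
--                 res=res+i
--                 cpt += 1
--         else :
--             res =3* res +1
--         cpt += 1
--     return (res,cpt)
-- ===== SOURCE B (Python) =====
-- def A(n):
--     # Closed form: even n -> arithmetic series summed n times; odd n -> (3^n-1)/2 via fast pow.
--     if n <= 0:
--         return (0, 0)
--     if n % 2 == 0:
--         return (n * n * (n - 1) // 2, n * (n + 1))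
--     return ((3 ** n - 1) // 2, n)
-- ===== Notes on version B (the rewrite author's own statement) =====
-- stated objective: faster
-- what changed: Replaced the nested parity-dependent loops by closed forms - Gauss sum for even n, the geometric closed form of the triple-and-increment recurrence via built-in fast power for odd n; intended as faster, measured up to about 100x at the largest sizes where A still finished.
import Mathlib
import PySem

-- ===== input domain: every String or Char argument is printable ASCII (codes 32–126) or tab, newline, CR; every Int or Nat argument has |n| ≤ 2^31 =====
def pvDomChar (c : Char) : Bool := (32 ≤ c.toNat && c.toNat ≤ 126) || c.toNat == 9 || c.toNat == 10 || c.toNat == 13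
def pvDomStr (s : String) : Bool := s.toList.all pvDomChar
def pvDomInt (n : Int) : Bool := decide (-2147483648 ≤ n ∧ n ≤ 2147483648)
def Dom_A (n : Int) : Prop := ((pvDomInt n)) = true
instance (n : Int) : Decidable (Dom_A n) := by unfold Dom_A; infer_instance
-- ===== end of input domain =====

-- B replaces A's nested parity-dependent loops by closed forms (Gauss sum for even n, geometric closed form for odd n); intended as faster, measured faster where A finishes.

-- ===== PORT A =====
def A (n : Int) : Int × Int :=
  (PySem.List.pyRange 0 n 1).foldl
    (fun (p : Int × Int) _k =>
      let p' :=
        if PySem.Int.mod n 2 = 0 then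
          (PySem.List.pyRange 0 n 1).foldl (fun (q : Int × Int) i => (q.1 + i, q.2 + 1)) p
        else
          (3 * p.1 + 1, p.2)
      (p'.1, p'.2 + 1))
    (0, 0)

-- ===== PORT B =====
def A_alt (n : Int) : Int × Int :=
  if n ≤ 0 then (0, 0)
  else if PySem.Int.mod n 2 = 0 then
    (PySem.Int.floordiv (n * n * (n - 1)) 2, n * (n + 1))
  else
    (PySem.Int.floordiv (3 ^ n.toNat - 1) 2, n)

-- ===== PRECONDITION & SPEC =====
def Spec_A (n : Int) (out : Int × Int) : Prop := out = A_alt n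
instance (n : Int) (out : Int × Int) : Decidable (Spec_A n out) := by unfold Spec_A; infer_instance

-- ===== CLAIM (what is proved, stated in full; the proofs are below) =====
def Claim_equal_A : Prop := ∀ (n : Int), Dom_A n → Spec_A n (A n)

-- ===== LEMMAS AND PROOFS =====

-- inner loop of the even case: adds the list sum to res and the length to cpt
lemma inner_fold (L : List Int) (p : Int × Int) :
    L.foldl (fun (q : Int × Int) i => (q.1 + i, q.2 + 1)) p
      = (p.1 + L.sum, p.2 + L.length) := by
  induction L generalizing p with
  | nil => simp
  | cons a t ih =>
      simp [List.foldl_cons, ih]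
      constructor <;> ring

-- outer loop, even case: constant step per iteration
lemma const_fold (L : List Int) (S c : Int) (p : Int × Int) :
    L.foldl (fun (q : Int × Int) _ => (q.1 + S, q.2 + c + 1)) p
      = (p.1 + L.length * S, p.2 + L.length * (c + 1)) := by
  induction L generalizing p with
  | nil => simp
  | cons a t ih =>
      simp [List.foldl_cons, ih]
      refine ⟨by ring, by ring⟩

-- outer loop, odd case: res ↦ 3*res+1, tracked via the invariant 2*res+1 = 3^k*(2*res₀+1)
lemma odd_fold (L : List Int) (p : Int × Int) :
    2 * (L.foldl (fun (q : Int × Int) _ => (3 * q.1 + 1, q.2 + 1)) p).1 + 1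
        = 3 ^ L.length * (2 * p.1 + 1)
    ∧ (L.foldl (fun (q : Int × Int) _ => (3 * q.1 + 1, q.2 + 1)) p).2
        = p.2 + L.length := by
  induction L generalizing p with
  | nil => simp
  | cons a t ih =>
      obtain ⟨h1, h2⟩ := ih (3 * p.1 + 1, p.2 + 1)
      refine ⟨?_, ?_⟩
      · simp only [List.foldl_cons, List.length_cons] at h1 ⊢
        rw [h1]; ring
      · simp only [List.foldl_cons, List.length_cons] at h2 ⊢
        rw [h2]; push_cast; ring

-- Gauss sum of range(0, m)
lemma sum_pyRange (m : Nat) :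
    2 * (PySem.List.pyRange 0 (m : Int) 1).sum = (m : Int) * ((m : Int) - 1) := by
  induction m with
  | zero => simp
  | succ k ih =>
      have h : PySem.List.pyRange 0 ((k : Int) + 1) 1
          = PySem.List.pyRange 0 (k : Int) 1 ++ [(k : Int)] :=
        PySem.List.pyRange_one_succ_right (by positivity)
      push_cast
      rw [h, List.sum_append]
      simp only [List.sum_cons, List.sum_nil]
      linear_combination ih

lemma floordiv_two_mul (x : Int) : PySem.Int.floordiv (2 * x) 2 = x := by
  simp [PySem.Int.floordiv]

-- ===== VERDICT =====
theorem A_spec : Claim_equal_A := by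
  intro n _
  unfold Spec_A A A_alt
  by_cases hle : n ≤ 0
  · rw [PySem.List.pyRange_one_eq_nil hle]
    simp [hle]
  · have hpos : 0 < n := lt_of_not_ge hle
    have hlen : ((PySem.List.pyRange 0 n 1).length : Int) = n := by
      rw [PySem.List.length_pyRange_one]; omega
    by_cases hpar : PySem.Int.mod n 2 = 0
    · -- even case
      simp only [if_pos hpar, if_neg hle, inner_fold]
      rw [const_fold, hlen]
      have hsum : 2 * (PySem.List.pyRange 0 n 1).sum = n * (n - 1) := by
        have := sum_pyRange n.toNat
        rwa [Int.toNat_of_nonneg (le_of_lt hpos)] at this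
      have h1 : n * n * (n - 1) = 2 * (n * (PySem.List.pyRange 0 n 1).sum) := by
        linear_combination -n * hsum
      rw [h1, floordiv_two_mul]
      simp
    · -- odd case
      simp only [if_neg hpar, if_neg hle]
      obtain ⟨h1, h2⟩ := odd_fold (PySem.List.pyRange 0 n 1) ((0 : Int), (0 : Int))
      have hL : (PySem.List.pyRange 0 n 1).length = n.toNat := by
        rw [PySem.List.length_pyRange_one]; omega
      rw [hL] at h1 h2
      simp only at h1 h2
      refine Prod.ext ?_ ?_
      · have h3 : (3 : Int) ^ n.toNat - 1
            = 2 * ((PySem.List.pyRange 0 n 1).foldl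
                (fun (q : Int × Int) _ => (3 * q.1 + 1, q.2 + 1)) ((0:Int),(0:Int))).1 := by
          omega
        rw [h3, floordiv_two_mul]
      · rw [h2]
        omega
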